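-- pv_equiv track=rewrite | github.com/GtTmy/gmusic-downloader | downloader.py | trim_name
-- ===== SOURCE A (Python) =====
-- def trim_name(name):
--     """ replace "/" and "." to "_"
--     if name length is more than 30, it is shorten to 30.
--     """
--     illigal_char = ("/",".",":","<",">",";","*","?","\"","|",",","*")
--     tmp = name
--     for el in illigal_char:
--         tmp = tmp.replace(el, "_")
--
--     if len(tmp) > 30:
--         tmp = tmp[:30]
--     return tmp
-- ===== SOURCE B (Python) =====
-- def trim_name(name):
--     """ replace "/" and "." to "_"
--     if name length is more than 30, it is shorten to 30.
--     """
--     illegal = set('/.:<>;*?"|,')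
--     tmp = ''.join('_' if c in illegal else c for c in name)
--     if len(tmp) > 30:
--         tmp = tmp[:30]
--     return tmp
-- ===== Notes on version B (the rewrite author's own statement) =====
-- stated objective: alternative
-- what changed: B replaces A's twelve full-string .replace passes by a single character-by-character pass that emits an underscore for characters in an illegal-character set, then applies the same truncation to 30; same O(n) asymptotics, and CPython's C-level .replace makes A faster in practice.
import Mathlib
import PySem

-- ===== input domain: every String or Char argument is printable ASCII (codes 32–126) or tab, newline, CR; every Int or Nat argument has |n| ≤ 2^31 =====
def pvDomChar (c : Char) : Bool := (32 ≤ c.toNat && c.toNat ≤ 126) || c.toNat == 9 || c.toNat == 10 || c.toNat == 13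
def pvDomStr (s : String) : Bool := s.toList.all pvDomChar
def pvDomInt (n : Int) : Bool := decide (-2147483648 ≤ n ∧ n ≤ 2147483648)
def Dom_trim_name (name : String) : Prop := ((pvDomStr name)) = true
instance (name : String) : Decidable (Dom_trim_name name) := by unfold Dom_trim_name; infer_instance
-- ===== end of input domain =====

-- B replaces A's twelve full-string .replace passes by one character-by-character pass over an illegal-character set (same truncation to 30); an alternative single-pass decomposition, not claimed faster.


-- ===== PORT A =====
def trim_name (name : String) : String :=
  let illigal_char : List String := ["/", ".", ":", "<", ">", ";", "*", "?", "\"", "|", ",", "*"]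
  let tmp := illigal_char.foldl (fun tmp el => PySem.Str.replace tmp el "_") name
  if PySem.Str.len tmp > 30 then PySem.Str.slice tmp none (some 30) else tmp

-- ===== PORT B =====
def trimIllegal : List Char := ['/', '.', ':', '<', '>', ';', '*', '?', '"', '|', ',']

def trim_name_alt (name : String) : String :=
  let tmp := String.ofList (name.toList.map (fun c => if trimIllegal.contains c then '_' else c))
  if PySem.Str.len tmp > 30 then PySem.Str.slice tmp none (some 30) else tmp

-- ===== PRECONDITION & SPEC =====
def Spec_trim_name (name : String) (out : String) : Prop := out = trim_name_alt name
instance (name : String) (out : String) : Decidable (Spec_trim_name name out) := by unfold Spec_trim_name; infer_instance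

-- ===== CLAIM (what is proved, stated in full; the proofs are below) =====
def Claim_equal_trim_name : Prop := ∀ (name : String), Dom_trim_name name → Spec_trim_name name (trim_name name)

-- ===== LEMMAS AND PROOFS =====

-- replacing a single character by a single character is a per-character map
theorem replace_go_single (a b : Char) :
    ∀ (fuel : Nat) (l acc : List Char), l.length ≤ fuel →
      PySem.Chars.replace.go [a] [b] fuel l acc
        = acc.reverse ++ l.map (fun c => if c = a then b else c) := by
  intro fuel
  induction fuel with
  | zero =>
    intro l acc h
    have : l = [] := List.eq_nil_of_length_eq_zero (Nat.le_zero.mp h)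
    subst this
    simp [PySem.Chars.replace.go]
  | succ n ih =>
    intro l acc h
    cases l with
    | nil => simp [PySem.Chars.replace.go]
    | cons c t =>
      by_cases hc : c = a
      · subst hc
        have hp : List.isPrefixOf [c] (c :: t) = true := by
          simp [List.isPrefixOf]
        rw [PySem.Chars.replace.go]
        simp only [hp, if_true, List.length_cons, List.length_nil, List.drop_succ_cons,
          List.drop_zero]
        rw [ih t ([b].reverse ++ acc) (by simpa using Nat.lt_succ_iff.mp (by simpa using h))]
        simp
      · have hp : List.isPrefixOf [a] (c :: t) = false := by
          simp only [List.isPrefixOf, Bool.and_eq_false_iff]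
          left
          simp [beq_eq_false_iff_ne]
          exact fun hh => hc hh.symm
        rw [PySem.Chars.replace.go]
        simp only [hp]
        rw [ih t (c :: acc) (by simpa using Nat.lt_succ_iff.mp (by simpa using h))]
        simp [hc]

theorem replace_single (a b : Char) (s : List Char) :
    PySem.Chars.replace s [a] [b] = s.map (fun c => if c = a then b else c) := by
  rw [PySem.Chars.replace]
  simp only [List.isEmpty_cons, if_false, Bool.false_eq_true]
  simpa using replace_go_single a b s.length s [] (le_refl _)

-- one more single-character replacement extends the set-based map by one character
theorem mapset (a : Char) (S S' : List Char) (hS : S' = S ++ [a]) (s : List Char) :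
    (s.map (fun c => if S.contains c then '_' else c)).map (fun c => if c = a then '_' else c)
      = s.map (fun c => if S'.contains c then '_' else c) := by
  subst hS
  rw [List.map_map]
  refine List.map_congr_left ?_
  intro c _
  by_cases h1 : S.contains c = true <;> by_cases h2 : c = a <;>
    simp_all

theorem mapset0 (a : Char) (s : List Char) :
    s.map (fun c => if c = a then '_' else c)
      = s.map (fun c => if ([a] : List Char).contains c then '_' else c) := by
  refine List.map_congr_left ?_
  intro c _
  simp

theorem contains_extra (c : Char) :
    (trimIllegal ++ ['*']).contains c = trimIllegal.contains c := by
  by_cases h : c = '*'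
  · subst h; decide
  · simp [h]

set_option maxHeartbeats 1000000 in
theorem trim_name_spec : Claim_equal_trim_name := by
  intro name _
  unfold Spec_trim_name trim_name trim_name_alt
  simp only [List.foldl, PySem.Str.replace, String.toList_ofList]
  suffices h :
      PySem.Chars.replace (PySem.Chars.replace (PySem.Chars.replace (PySem.Chars.replace
        (PySem.Chars.replace (PySem.Chars.replace (PySem.Chars.replace (PySem.Chars.replace
        (PySem.Chars.replace (PySem.Chars.replace (PySem.Chars.replace (PySem.Chars.replace
        name.toList "/".toList "_".toList) ".".toList "_".toList) ":".toList "_".toList)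
        "<".toList "_".toList) ">".toList "_".toList) ";".toList "_".toList) "*".toList "_".toList)
        "?".toList "_".toList) "\"".toList "_".toList) "|".toList "_".toList) ",".toList "_".toList)
        "*".toList "_".toList
      = name.toList.map (fun c => if trimIllegal.contains c then '_' else c) by
    rw [h]
  have t1 : ("/" : String).toList = ['/'] := rfl
  have t2 : ("." : String).toList = ['.'] := rfl
  have t3 : (":" : String).toList = [':'] := rfl
  have t4 : ("<" : String).toList = ['<'] := rfl
  have t5 : (">" : String).toList = ['>'] := rfl
  have t6 : (";" : String).toList = [';'] := rfl
  have t7 : ("*" : String).toList = ['*'] := rfl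
  have t8 : ("?" : String).toList = ['?'] := rfl
  have t9 : ("\"" : String).toList = ['"'] := rfl
  have t10 : ("|" : String).toList = ['|'] := rfl
  have t11 : ("," : String).toList = [','] := rfl
  have t12 : ("_" : String).toList = ['_'] := rfl
  rw [t1, t2, t3, t4, t5, t6, t7, t8, t9, t10, t11, t12]
  simp only [replace_single]
  rw [mapset0 '/']
  rw [mapset '.' ['/'] ['/', '.'] rfl]
  rw [mapset ':' ['/', '.'] ['/', '.', ':'] rfl]
  rw [mapset '<' ['/', '.', ':'] ['/', '.', ':', '<'] rfl]
  rw [mapset '>' ['/', '.', ':', '<'] ['/', '.', ':', '<', '>'] rfl]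
  rw [mapset ';' ['/', '.', ':', '<', '>'] ['/', '.', ':', '<', '>', ';'] rfl]
  rw [mapset '*' ['/', '.', ':', '<', '>', ';'] ['/', '.', ':', '<', '>', ';', '*'] rfl]
  rw [mapset '?' ['/', '.', ':', '<', '>', ';', '*'] ['/', '.', ':', '<', '>', ';', '*', '?'] rfl]
  rw [mapset '"' ['/', '.', ':', '<', '>', ';', '*', '?']
    ['/', '.', ':', '<', '>', ';', '*', '?', '"'] rfl]
  rw [mapset '|' ['/', '.', ':', '<', '>', ';', '*', '?', '"']
    ['/', '.', ':', '<', '>', ';', '*', '?', '"', '|'] rfl]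
  rw [mapset ',' ['/', '.', ':', '<', '>', ';', '*', '?', '"', '|']
    ['/', '.', ':', '<', '>', ';', '*', '?', '"', '|', ','] rfl]
  rw [mapset '*' ['/', '.', ':', '<', '>', ';', '*', '?', '"', '|', ',']
    (['/', '.', ':', '<', '>', ';', '*', '?', '"', '|', ','] ++ ['*']) rfl]
  refine List.map_congr_left ?_
  intro c _
  rw [show (['/', '.', ':', '<', '>', ';', '*', '?', '"', '|', ','] : List Char) = trimIllegal from rfl,
    contains_extra]
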